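-- pv_equiv track=rewrite | github.com/neuraldevelopment/basefunctions | bin/ppip.py | sort_packages_for_display
-- ===== SOURCE A (Python) =====
-- from typing import Any, Dict, List, Optional, Tuple, Union
--
-- def sort_packages_for_display(packages: List[tuple]) -> List[tuple]:
--     """
--     Sort packages alphabetically within local and PyPI groups.
--
--     Parameters
--     ----------
--     packages : List[tuple]
--         List of package tuples: (name, available, installed, status)
--
--     Returns
--     -------
--     List[tuple]
--         Sorted packages list with separator between local and PyPI packages
--     """
--     # Separate local and PyPI packages
--     local_packages = [pkg for pkg in packages if pkg[3] != "pypi"]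
--     pypi_packages = [pkg for pkg in packages if pkg[3] == "pypi"]
--
--     # Sort local packages alphabetically (case-insensitive)
--     sorted_local = sorted(local_packages, key=lambda pkg: pkg[0].lower())
--
--     # Sort PyPI packages alphabetically (case-insensitive)
--     sorted_pypi = sorted(pypi_packages, key=lambda pkg: pkg[0].lower())
--
--     # Combine with separator if both groups exist
--     if sorted_local and sorted_pypi:
--         return sorted_local + [("__separator__", None, None, None)] + sorted_pypi
--     elif sorted_local:
--         return sorted_local
--     else:
--         return sorted_pypi
-- ===== SOURCE B (Python) =====
-- def _first_pypi_index(out):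
--     i = 0
--     for pkg in out:
--         if pkg[3] == "pypi":
--             break
--         i += 1
--     return i
--
--
-- def sort_packages_for_display(packages):
--     # One stable sort with a composite key, then splice the separator at the group boundary.
--     out = sorted(packages, key=lambda pkg: (pkg[3] == "pypi", pkg[0].lower()))
--     i = _first_pypi_index(out)
--     if 0 < i < len(out):
--         return out[:i] + [("__separator__", None, None, None)] + out[i:]
--     return out
-- ===== Notes on version B (the rewrite author's own statement) =====
-- stated objective: alternative
-- what changed: Replaces A's two-filter/two-sort/three-branch combination with a single stable sort on the composite key (is_pypi, name.lower()) followed by one linear scan that finds the group boundary and splices the separator there when both groups are non-empty.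
import Mathlib
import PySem

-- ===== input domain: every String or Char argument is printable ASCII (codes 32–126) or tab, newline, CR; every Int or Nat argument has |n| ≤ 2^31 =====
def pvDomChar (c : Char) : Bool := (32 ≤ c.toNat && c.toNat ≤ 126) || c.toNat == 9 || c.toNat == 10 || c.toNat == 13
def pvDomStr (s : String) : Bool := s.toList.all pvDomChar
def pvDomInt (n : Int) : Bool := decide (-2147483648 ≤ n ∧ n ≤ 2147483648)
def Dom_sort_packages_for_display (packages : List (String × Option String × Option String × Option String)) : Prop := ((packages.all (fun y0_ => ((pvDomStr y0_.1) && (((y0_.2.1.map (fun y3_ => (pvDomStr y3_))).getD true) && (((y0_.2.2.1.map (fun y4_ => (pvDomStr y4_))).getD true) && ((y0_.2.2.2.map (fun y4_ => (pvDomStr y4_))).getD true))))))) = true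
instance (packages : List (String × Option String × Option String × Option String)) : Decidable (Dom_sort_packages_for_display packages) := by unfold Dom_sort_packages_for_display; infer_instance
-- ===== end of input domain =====

-- B replaces A's two filters + two sorts with ONE stable sort on the composite key
-- (is_pypi, name.lower()) followed by a single boundary scan that splices the separator
-- (objective: alternative decomposition, same exact output).

-- ===== PORT A =====
-- A: partition into local / pypi, sort each case-insensitively, join with a separator
-- when both groups are non-empty.
def sort_packages_for_display (packages : List (String × Option String × Option String × Option String)) : List (String × Option String × Option String × Option String) :=
  let local_packages := packages.filter (fun pkg => !(pkg.2.2.2 == some "pypi"))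
  let pypi_packages := packages.filter (fun pkg => pkg.2.2.2 == some "pypi")
  let sorted_local := PySem.List.sorted local_packages (fun pkg => PySem.Str.lower pkg.1)
  let sorted_pypi := PySem.List.sorted pypi_packages (fun pkg => PySem.Str.lower pkg.1)
  if sorted_local ≠ [] ∧ sorted_pypi ≠ [] then
    sorted_local ++ [("__separator__", none, none, none)] ++ sorted_pypi
  else if sorted_local ≠ [] then sorted_local
  else sorted_pypi

-- ===== PORT B =====
-- B helper: index of the first pypi-flagged tuple (length of the list if none).
def pv_first_pypi_index (out : List (String × Option String × Option String × Option String)) : Nat :=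
  match out with
  | [] => 0
  | pkg :: rest => if pkg.2.2.2 == some "pypi" then 0 else pv_first_pypi_index rest + 1

def sort_packages_for_display_alt (packages : List (String × Option String × Option String × Option String)) : List (String × Option String × Option String × Option String) :=
  let out := PySem.List.sorted2 packages (fun pkg => pkg.2.2.2 == some "pypi") (fun pkg => PySem.Str.lower pkg.1)
  let i := pv_first_pypi_index out
  if 0 < i ∧ i < out.length then
    PySem.List.slice out none (some (i : Int)) ++ [("__separator__", none, none, none)] ++ PySem.List.slice out (some (i : Int)) none
  else out

-- ===== PRECONDITION & SPEC =====
def Spec_sort_packages_for_display (packages : List (String × Option String × Option String × Option String)) (out : List (String × Option String × Option String × Option String)) : Prop := out = sort_packages_for_display_alt packages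
instance (packages : List (String × Option String × Option String × Option String)) (out : List (String × Option String × Option String × Option String)) : Decidable (Spec_sort_packages_for_display packages out) := by unfold Spec_sort_packages_for_display; infer_instance

-- ===== CLAIM (what is proved, stated in full; the proofs are below) =====
def Claim_equal_sort_packages_for_display : Prop := ∀ (packages : List (String × Option String × Option String × Option String)), Dom_sort_packages_for_display packages → Spec_sort_packages_for_display packages (sort_packages_for_display packages)

-- ===== LEMMAS AND PROOFS =====

-- Inserting x into L ++ P, where x compares the same under b and b' against every
-- element of L and b puts x before the head of P: the insertion happens inside L.
theorem pv_insertBy_congr_append {α : Type} (b b' : α → α → Bool) (x : α) (L P : List α)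
    (hL : ∀ y ∈ L, b x y = b' x y) (hP : ∀ y t, P = y :: t → b x y = true) :
    PySem.List.insertBy b x (L ++ P) = PySem.List.insertBy b' x L ++ P := by
  induction L with
  | nil =>
    cases P with
    | nil => simp [PySem.List.insertBy]
    | cons y t => simp [PySem.List.insertBy, hP y t rfl]
  | cons z L ih =>
    have hz := hL z (by simp)
    by_cases h : b x z = true
    · simp [PySem.List.insertBy, h, hz ▸ h]
    · have h' : b' x z = false := by rw [← hz]; simpa using h
      simp only [List.cons_append, PySem.List.insertBy, h, h', Bool.false_eq_true,
        if_false]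
      rw [ih (fun y hy => hL y (by simp [hy]))]

-- Inserting x into L ++ P when x goes after every element of L: the insertion
-- happens inside P.
theorem pv_insertBy_skip_append {α : Type} (b : α → α → Bool) (x : α) (L P : List α)
    (hL : ∀ y ∈ L, b x y = false) :
    PySem.List.insertBy b x (L ++ P) = L ++ PySem.List.insertBy b x P := by
  induction L with
  | nil => simp
  | cons z L ih =>
    have hz := hL z (by simp)
    simp only [List.cons_append, PySem.List.insertBy, hz, Bool.false_eq_true, if_false]
    rw [ih (fun y hy => hL y (by simp [hy]))]

-- The partition invariant: insertion-sorting with the composite key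
-- (isP, k2) into an accumulator split as (all non-pypi) ++ (all pypi) keeps the split,
-- each half being insertion-sorted by k2 alone.
theorem pv_foldl_partition {α : Type} (isP : α → Bool) (k2 : α → String)
    (xs : List α) : ∀ (accL accP : List α),
    (∀ y ∈ accL, isP y = false) → (∀ y ∈ accP, isP y = true) →
    xs.foldl (fun acc x => PySem.List.insertBy
        (fun a b => decide (isP a < isP b) || (!decide (isP b < isP a) && decide (k2 a < k2 b))) x acc)
      (accL ++ accP)
    = (xs.filter (fun x => !isP x)).foldl
        (fun acc x => PySem.List.insertBy (fun a b => decide (k2 a < k2 b)) x acc) accL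
      ++ (xs.filter isP).foldl
        (fun acc x => PySem.List.insertBy (fun a b => decide (k2 a < k2 b)) x acc) accP := by
  induction xs with
  | nil => intro accL accP _ _; simp
  | cons x xs ih =>
    intro accL accP hL hP
    by_cases hx : isP x = true
    · have hstep : PySem.List.insertBy
          (fun a b => decide (isP a < isP b) || (!decide (isP b < isP a) && decide (k2 a < k2 b))) x (accL ++ accP)
          = accL ++ PySem.List.insertBy (fun a b => decide (k2 a < k2 b)) x accP := by
        rw [pv_insertBy_skip_append _ _ _ _ (fun y hy => by simp [hx, hL y hy])]
        congr 1
        have := pv_insertBy_congr_append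
          (fun a b => decide (isP a < isP b) || (!decide (isP b < isP a) && decide (k2 a < k2 b)))
          (fun a b => decide (k2 a < k2 b)) x accP []
          (fun y hy => by simp [hx, hP y hy]) (fun y t h => by simp at h)
        simpa using this
      simp only [List.foldl_cons, hstep, List.filter_cons, hx]
      rw [ih accL _ hL (fun y hy => by
        rcases (PySem.List.mem_insertBy _ _ _ _).mp hy with h | h
        · exact h ▸ hx
        · exact hP y h)]
      simp
    · have hx' : isP x = false := by simpa using hx
      have hstep : PySem.List.insertBy
          (fun a b => decide (isP a < isP b) || (!decide (isP b < isP a) && decide (k2 a < k2 b))) x (accL ++ accP)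
          = PySem.List.insertBy (fun a b => decide (k2 a < k2 b)) x accL ++ accP := by
        exact pv_insertBy_congr_append _ _ x accL accP
          (fun y hy => by simp [hx', hL y hy])
          (fun y t h => by simp [hx', hP y (by simp [h])])
      simp only [List.foldl_cons, hstep, List.filter_cons, hx']
      rw [ih _ accP (fun y hy => by
        rcases (PySem.List.mem_insertBy _ _ _ _).mp hy with h | h
        · exact h ▸ hx'
        · exact hL y h) hP]
      simp

-- sorted2 with the composite key = sorted of the non-pypi part ++ sorted of the pypi part.
theorem pv_sorted2_split (packages : List (String × Option String × Option String × Option String)) :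
    PySem.List.sorted2 packages (fun pkg => pkg.2.2.2 == some "pypi") (fun pkg => PySem.Str.lower pkg.1)
    = PySem.List.sorted (packages.filter (fun pkg => !(pkg.2.2.2 == some "pypi"))) (fun pkg => PySem.Str.lower pkg.1)
      ++ PySem.List.sorted (packages.filter (fun pkg => pkg.2.2.2 == some "pypi")) (fun pkg => PySem.Str.lower pkg.1) := by
  have := pv_foldl_partition (fun pkg => pkg.2.2.2 == some "pypi")
    (fun pkg => PySem.Str.lower pkg.1) packages [] [] (by simp) (by simp)
  simpa [PySem.List.sorted2, PySem.List.sorted] using this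

theorem pv_first_pypi_index_append (L P : List (String × Option String × Option String × Option String))
    (hL : ∀ y ∈ L, (y.2.2.2 == some "pypi") = false)
    (hP : ∀ y t, P = y :: t → (y.2.2.2 == some "pypi") = true) :
    pv_first_pypi_index (L ++ P) = L.length := by
  induction L with
  | nil =>
    cases P with
    | nil => simp [pv_first_pypi_index]
    | cons y t => simp [pv_first_pypi_index, hP y t rfl]
  | cons z L ih =>
    have hz := hL z (by simp)
    simp only [List.cons_append, pv_first_pypi_index, hz, Bool.false_eq_true, if_false,
      List.length_cons]
    rw [ih (fun y hy => hL y (by simp [hy]))]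

-- ===== VERDICT (by name: the statement is the Claim_ definition above) =====
theorem sort_packages_for_display_spec : Claim_equal_sort_packages_for_display := by
  intro packages _
  unfold Spec_sort_packages_for_display
  unfold sort_packages_for_display sort_packages_for_display_alt
  set SL := PySem.List.sorted (packages.filter (fun pkg => !(pkg.2.2.2 == some "pypi")))
    (fun pkg => PySem.Str.lower pkg.1) with hSL
  set SP := PySem.List.sorted (packages.filter (fun pkg => pkg.2.2.2 == some "pypi"))
    (fun pkg => PySem.Str.lower pkg.1) with hSP
  have hsplit : PySem.List.sorted2 packages (fun pkg => pkg.2.2.2 == some "pypi")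
      (fun pkg => PySem.Str.lower pkg.1) = SL ++ SP := pv_sorted2_split packages
  have hLmem : ∀ y ∈ SL, (y.2.2.2 == some "pypi") = false := by
    intro y hy
    have := ((PySem.List.mem_sorted _ _ _ _).mp (hSL ▸ hy))
    simpa using (List.mem_filter.mp this).2
  have hPmem : ∀ y ∈ SP, (y.2.2.2 == some "pypi") = true := by
    intro y hy
    have := ((PySem.List.mem_sorted _ _ _ _).mp (hSP ▸ hy))
    exact (List.mem_filter.mp this).2
  have hidx : pv_first_pypi_index (SL ++ SP) = SL.length :=
    pv_first_pypi_index_append SL SP hLmem (fun y t h => hPmem y (by simp [h]))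
  simp only [hsplit, hidx]
  simp only [← hSL, ← hSP]
  by_cases hL : SL = []
  · by_cases hQ : SP = [] <;> simp [hL, hQ]
  · have hLpos : 0 < SL.length := List.length_pos_iff.mpr hL
    by_cases hQ : SP = []
    · simp [hL, hQ]
    · have hlen : SL.length < (SL ++ SP).length := by
        simp [List.length_append]
        exact List.length_pos_iff.mpr hQ
      rw [if_pos ⟨hL, hQ⟩, if_pos ⟨hLpos, hlen⟩]
      rw [PySem.List.slice_to_natCast, PySem.List.slice_from_natCast]
      simp
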